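-- pv_equiv track=rewrite | github.com/huilizhou/Leetcode-pyhton | algorithms/笔试/2019.03.16_2.py | solve
-- ===== SOURCE A (Python) =====
-- def solve(s):
--     n = len(s)
--     r = list(s[:min(len(s), 2)])
--     for i in range(2, n):
--         if s[i] == r[-1] == r[-2]:
--             continue
--         if s[i] == r[-1] and len(r) > 2 and r[-2] == r[-3]:
--             continue
--         r.append(s[i])
--     return "".join(r)
-- ===== SOURCE B (Python) =====
-- def solve(s):
--     # Stage 1: run-length encode the input.
--     runs = []
--     for c in s:
--         if runs and runs[-1][0] == c:
--             runs[-1][1] += 1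
--         else:
--             runs.append([c, 1])
--     # Stage 2: each input run keeps min(2, k) chars, except that a run of
--     # length >= 2 is cut to 1 when the previous kept run was a double.
--     out = []
--     prev_double = False
--     for c, k in runs:
--         take = 2 if (k >= 2 and not prev_double) else 1
--         out.append(c * take)
--         prev_double = take == 2
--     return "".join(out)
-- ===== Notes on version B (the rewrite author's own statement) =====
-- stated objective: alternative
-- what changed: Two staged passes instead of A's single greedy scan with triple-lookback: first run-length encode the whole input, then decide each output run length locally (min(2,k), cut to 1 after a kept double) with a boolean flag, and expand.
import Mathlib
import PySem

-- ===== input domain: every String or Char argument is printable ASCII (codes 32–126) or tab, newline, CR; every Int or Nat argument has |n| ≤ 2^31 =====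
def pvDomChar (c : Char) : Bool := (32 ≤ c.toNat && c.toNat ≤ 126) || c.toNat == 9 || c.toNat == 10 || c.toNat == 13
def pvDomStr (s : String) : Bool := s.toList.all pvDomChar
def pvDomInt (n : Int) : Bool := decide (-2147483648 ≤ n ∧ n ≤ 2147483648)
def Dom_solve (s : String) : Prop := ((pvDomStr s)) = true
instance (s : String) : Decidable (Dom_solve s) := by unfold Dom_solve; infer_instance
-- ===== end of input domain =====

-- B replaces A's single greedy scan with triple-lookback by two staged passes:
-- run-length encode the input, then fix each output run length locally from the
-- run length and a carried boolean, and expand (objective: alternative).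

-- ===== PORT A =====
-- the loop body of A; pyGetD is exact: every access occurs with the index in range
-- (r always has length ≥ 2 when the loop runs, and r[-3] only behind `len(r) > 2`)
def solveStep (r : List Char) (c : Char) : List Char :=
  if c = PySem.List.pyGetD r (-1) ' ' ∧ PySem.List.pyGetD r (-1) ' ' = PySem.List.pyGetD r (-2) ' ' then r
  else if c = PySem.List.pyGetD r (-1) ' ' ∧ r.length > 2 ∧
      PySem.List.pyGetD r (-2) ' ' = PySem.List.pyGetD r (-3) ' ' then r
  else r ++ [c]

def solve (s : String) : String :=
  let cs := s.toList
  let n : Int := cs.length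
  let r0 := PySem.List.slice cs (some 0) (some (min n 2))
  let r := (PySem.List.pyRange 2 n 1).foldl
      (fun r i => solveStep r (PySem.List.pyGetD cs i ' ')) r0
  String.ofList r

-- ===== PORT B =====
-- stage 1 of B: one step of the run-length encoding of the input
def rleStep (runs : List (Char × Nat)) (c : Char) : List (Char × Nat) :=
  match runs.getLast? with
  | some (d, k) => if d = c then runs.dropLast ++ [(d, k + 1)] else runs ++ [(c, 1)]
  | none => runs ++ [(c, 1)]

-- stage 2 of B: one step over the runs (kept pieces so far, previous-kept-a-double flag)
def outStep (st : List String × Bool) (p : Char × Nat) : List String × Bool :=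
  let take : Nat := if 2 ≤ p.2 ∧ st.2 = false then 2 else 1
  (st.1 ++ [String.ofList (List.replicate take p.1)], take == 2)

def solve_alt (s : String) : String :=
  let runs := s.toList.foldl rleStep []
  let st := runs.foldl outStep ([], false)
  PySem.Str.join "" st.1

-- ===== PRECONDITION & SPEC =====
def Spec_solve (s : String) (out : String) : Prop := out = solve_alt s
instance (s : String) (out : String) : Decidable (Spec_solve s out) := by unfold Spec_solve; infer_instance

-- ===== CLAIM (what is proved, stated in full; the proofs are below) =====
def Claim_equal_solve : Prop := ∀ (s : String), Dom_solve s → Spec_solve s (solve s)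

-- ===== LEMMAS AND PROOFS =====

-- reversed-order greedy over runs (most recent run first): proof-only middle ground
def rstep : List (Char × Nat) → Char → List (Char × Nat)
  | [], c => [(c, 1)]
  | (d, k) :: rest, c =>
    if d = c then
      if k = 2 then (d, k) :: rest
      else
        match rest with
        | (e, k2) :: rest' => if k2 = 2 then (d, k) :: (e, k2) :: rest' else (d, 2) :: rest
        | [] => (d, 2) :: rest
    else (c, 1) :: (d, k) :: rest

-- reversed-order mirror of solveStep, used only by the proof
def gA (rl : List Char) (c : Char) : List Char :=
  match rl with
  | a :: b :: rest =>
    if c = a ∧ a = b then rl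
    else if c = a ∧ rest.head? = some b then rl
    else c :: rl
  | _ => c :: rl

-- expansion of a run list into the character list (reversed runs expand to the reversed string)
def rexpand (rs : List (Char × Nat)) : List Char :=
  rs.flatMap (fun p => List.replicate p.2 p.1)

-- invariant on greedy-output run lists: adjacent runs distinct, counts 1 or 2
def goodR (rs : List (Char × Nat)) : Prop :=
  List.IsChain (fun p q => p.1 ≠ q.1) rs ∧ ∀ p ∈ rs, p.2 = 1 ∨ p.2 = 2

-- reversed-order mirror of rleStep
def rleR : List (Char × Nat) → Char → List (Char × Nat)
  | [], c => [(c, 1)]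
  | (d, k) :: rest, c => if d = c then (d, k + 1) :: rest else (c, 1) :: (d, k) :: rest

-- "most recent kept run is a double"
def pdOf : List (Char × Nat) → Bool
  | (_, k) :: _ => k == 2
  | [] => false

-- stage 2 of B as a pure function over forward run lists
def procRuns : Bool → List (Char × Nat) → List (Char × Nat)
  | _, [] => []
  | pd, (c, k) :: R =>
    (c, if 2 ≤ k ∧ pd = false then 2 else 1) ::
      procRuns ((if 2 ≤ k ∧ pd = false then 2 else 1) == 2) R

theorem pyGetD_neg_one_app2 (xs : List Char) (b a : Char) :
    PySem.List.pyGetD (xs ++ [b, a]) (-1) ' ' = a := by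
  rw [show xs ++ [b, a] = (xs ++ [b]) ++ [a] by simp]
  exact PySem.List.pyGetD_neg_one_append_singleton _ _ _

theorem pyGetD_neg_two_app (xs : List Char) (b a : Char) :
    PySem.List.pyGetD (xs ++ [b, a]) (-2) ' ' = b := by
  rw [PySem.List.pyGetD_neg_ofNat (xs ++ [b, a]) 2 ' ' (by omega) (by simp)]
  simp

theorem pyGetD_neg_three_app (xs : List Char) (x b a : Char) :
    PySem.List.pyGetD (xs ++ [x, b, a]) (-3) ' ' = x := by
  rw [PySem.List.pyGetD_neg_ofNat (xs ++ [x, b, a]) 3 ' ' (by omega) (by simp)]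
  simp

theorem stepA_rev (rl : List Char) (c : Char) (h : 2 ≤ rl.length) :
    solveStep rl.reverse c = (gA rl c).reverse := by
  match rl with
  | [] => simp at h
  | [a] => simp at h
  | a :: b :: rest =>
    have hrev : (a :: b :: rest).reverse = rest.reverse ++ [b, a] := by simp
    rw [hrev]
    unfold solveStep gA
    rw [pyGetD_neg_one_app2, pyGetD_neg_two_app]
    cases rest with
    | nil =>
      by_cases h1 : c = a ∧ a = b
      · simp [h1]
      · simp [h1]
    | cons x rest' =>
      have hrev2 : (x :: rest').reverse ++ [b, a] = rest'.reverse ++ [x, b, a] := by simp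
      rw [hrev2, pyGetD_neg_three_app]
      by_cases h1 : c = a ∧ a = b
      · simp [h1]
      · by_cases h2 : c = a ∧ b = x
        · have hlen : (rest'.reverse ++ [x, b, a]).length > 2 := by simp
          simp [h2]
        · have h2' : ¬(c = a ∧ x = b) := fun hp => h2 ⟨hp.1, hp.2.symm⟩
          simp [h1, h2', h2]

theorem head?_rexpand (rs : List (Char × Nat)) (h : ∀ p ∈ rs, p.2 = 1 ∨ p.2 = 2) :
    (rexpand rs).head? = rs.head?.map Prod.fst := by
  cases rs with
  | nil => rfl
  | cons p rest =>
    obtain ⟨f, kf⟩ := p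
    have hk := h (f, kf) List.mem_cons_self
    simp only at hk
    rcases hk with hk | hk <;> subst hk <;> simp [rexpand]

theorem goodR_cons (p : Char × Nat) (rs : List (Char × Nat)) (hp : p.2 = 1 ∨ p.2 = 2)
    (hne : ∀ q ∈ rs.head?, p.1 ≠ q.1) (h : goodR rs) : goodR (p :: rs) := by
  obtain ⟨hc, hcnt⟩ := h
  refine ⟨?_, ?_⟩
  · cases rs with
    | nil => simp
    | cons q rest => exact List.isChain_cons_cons.mpr ⟨hne q (by simp), hc⟩
  · intro q hq
    rcases List.mem_cons.mp hq with h | h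
    · subst h; exact hp
    · exact hcnt q h

theorem step_good (rs : List (Char × Nat)) (c : Char) (hg : goodR rs)
    (hlen : 2 ≤ (rexpand rs).length) :
    gA (rexpand rs) c = rexpand (rstep rs c) ∧ goodR (rstep rs c) := by
  obtain ⟨hchain, hcounts⟩ := hg
  cases rs with
  | nil => simp [rexpand] at hlen
  | cons p rest =>
    obtain ⟨d, k⟩ := p
    have hk := hcounts (d, k) List.mem_cons_self
    simp only at hk
    rcases hk with hk | hk <;> subst hk
    · -- k = 1
      cases rest with
      | nil => simp [rexpand] at hlen
      | cons q rest' =>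
        obtain ⟨e, ke⟩ := q
        have hde : d ≠ e := (List.isChain_cons_cons.mp hchain).1
        have hchain' : List.IsChain (fun p q => p.1 ≠ q.1) ((e, ke) :: rest') :=
          (List.isChain_cons_cons.mp hchain).2
        have hcounts' : ∀ p ∈ (e, ke) :: rest', p.2 = 1 ∨ p.2 = 2 :=
          fun p hp => hcounts p (List.mem_cons_of_mem _ hp)
        have hke := hcounts' (e, ke) List.mem_cons_self
        simp only at hke
        by_cases hcd : c = d
        · subst hcd
          rcases hke with hke | hke <;> subst hke
          · -- ke = 1 : extend last run to 2
            have hhead : ¬ (rexpand rest').head? = some e := by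
              rw [head?_rexpand rest' (fun p hp => hcounts' p (List.mem_cons_of_mem _ hp))]
              cases rest' with
              | nil => simp
              | cons r rest'' =>
                have : e ≠ r.1 := (List.isChain_cons_cons.mp hchain').1
                simp [this.symm]
            have hr : rstep ((c, 1) :: (e, 1) :: rest') c = (c, 2) :: (e, 1) :: rest' := by
              simp [rstep]
            rw [hr]
            constructor
            · simp only [rexpand, List.flatMap_cons] at hhead ⊢
              simp [gA, hde, hhead]
            · exact goodR_cons _ _ (by simp) (by simpa using hde)
                ⟨hchain', fun p hp => hcounts' p hp⟩
          · -- ke = 2 : blocked by preceding double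
            have hr : rstep ((c, 1) :: (e, 2) :: rest') c = (c, 1) :: (e, 2) :: rest' := by
              simp [rstep]
            rw [hr]
            exact ⟨by simp [rexpand, gA, hde], hchain, hcounts⟩
        · -- c ≠ d : new run
          have hdc : ¬ d = c := fun h => hcd h.symm
          have hr : rstep ((d, 1) :: (e, ke) :: rest') c = (c, 1) :: (d, 1) :: (e, ke) :: rest' := by
            simp [rstep, hdc]
          rw [hr]
          constructor
          · rcases hke with hke | hke <;> subst hke <;> simp [rexpand, gA, hcd, hde]
          · exact goodR_cons _ _ (by simp) (by simpa using hcd) ⟨hchain, hcounts⟩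
    · -- k = 2 : last run already a double
      by_cases hcd : c = d
      · subst hcd
        have hr : rstep ((c, 2) :: rest) c = (c, 2) :: rest := by simp [rstep]
        rw [hr]
        exact ⟨by simp [rexpand, gA], hchain, hcounts⟩
      · have hdc : ¬ d = c := fun h => hcd h.symm
        have hr : rstep ((d, 2) :: rest) c = (c, 1) :: (d, 2) :: rest := by
          simp [rstep, hdc]
        rw [hr]
        exact ⟨by simp [rexpand, gA, hcd], goodR_cons _ _ (by simp) (by simpa using hcd)
          ⟨hchain, hcounts⟩⟩

theorem length_le_gA (rl : List Char) (c : Char) : rl.length ≤ (gA rl c).length := by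
  cases rl with
  | nil => simp [gA]
  | cons a tl =>
    cases tl with
    | nil => simp [gA]
    | cons b rest =>
      simp only [gA]
      split_ifs <;> simp

theorem main_loop (l : List Char) (rs : List (Char × Nat)) (hg : goodR rs)
    (hlen : 2 ≤ (rexpand rs).length) :
    l.foldl solveStep (rexpand rs).reverse = (rexpand (l.foldl rstep rs)).reverse := by
  induction l generalizing rs with
  | nil => rfl
  | cons c l ih =>
    obtain ⟨he, hgood⟩ := step_good rs c hg hlen
    have h2 : 2 ≤ (rexpand (rstep rs c)).length := by
      rw [← he]
      exact le_trans hlen (length_le_gA _ _)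
    simp only [List.foldl_cons, stepA_rev _ _ hlen, he, ih _ hgood h2]

-- A's result, characterised through the reversed greedy over runs
theorem solveA_char (s : String) :
    solve s = String.ofList ((rexpand (s.toList.foldl rstep [])).reverse) := by
  unfold solve
  dsimp only
  rcases hcs : s.toList with _ | ⟨a, _ | ⟨b, rest⟩⟩
  · simp [PySem.List.pyRange_one_eq_nil (by omega : (0:Int) ≤ 2),
      PySem.List.slice_to _ (by omega : (0:Int) ≤ 0), rexpand]
  · simp [PySem.List.pyRange_one_eq_nil (by omega : (1:Int) ≤ 2),
      PySem.List.slice_to _ (by omega : (0:Int) ≤ 1), rstep, rexpand]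
  · set cs := a :: b :: rest with hcsdef
    have hr0 : PySem.List.slice cs (some 0) (some (min (cs.length : Int) 2)) = [a, b] := by
      have : min ((cs.length : Int)) 2 = 2 := by simp [hcsdef]; omega
      rw [this, PySem.List.slice_zero_start, PySem.List.slice_to cs (show (0:Int) ≤ 2 by omega)]
      simp [hcsdef]
    have hfold : (PySem.List.pyRange 2 (cs.length : Int) 1).foldl
        (fun r i => solveStep r (PySem.List.pyGetD cs i ' ')) [a, b]
        = rest.foldl solveStep [a, b] := by
      have := PySem.List.foldl_pyRange_pyGetD' cs ' ' solveStep ([a, b])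
        (show (0:Int) ≤ 2 by omega)
      simpa [hcsdef] using this
    set rs0 := rstep (rstep [] a) b with hrs0
    have hprops : rexpand rs0 = [b, a] ∧ goodR rs0 := by
      by_cases hab : a = b
      · subst hab
        have : rs0 = [(a, 2)] := by simp [hrs0, rstep]
        rw [this]
        exact ⟨by simp [rexpand], by simp, by simp⟩
      · have hab' : ¬ a = b := hab
        have : rs0 = [(b, 1), (a, 1)] := by simp [hrs0, rstep, hab']
        rw [this]
        refine ⟨by simp [rexpand], ?_, ?_⟩
        · exact List.isChain_cons_cons.mpr ⟨fun h => hab h.symm, by simp⟩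
        · simp
    obtain ⟨hexp, hgood⟩ := hprops
    have hmain := main_loop rest rs0 hgood (by rw [hexp]; simp)
    rw [hexp] at hmain
    have hAll : cs.foldl rstep [] = rest.foldl rstep rs0 := by
      simp [hcsdef, hrs0]
    rw [hr0, hfold, hAll]
    show String.ofList (rest.foldl solveStep ([b, a].reverse)) = _
    rw [hmain]

-- rexpand commutes with reversal (replicates are palindromes)
theorem rexpand_reverse (L : List (Char × Nat)) :
    rexpand L.reverse = (rexpand L).reverse := by
  rw [rexpand, rexpand, List.reverse_flatMap]
  simp [Function.comp_def, List.reverse_replicate]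

-- B's stage-1 loop mirrors rleR
theorem rleStep_rev (rl : List (Char × Nat)) (c : Char) :
    rleStep rl.reverse c = (rleR rl c).reverse := by
  cases rl with
  | nil => rfl
  | cons p rest =>
    obtain ⟨d, k⟩ := p
    have hrev : ((d, k) :: rest).reverse = rest.reverse ++ [(d, k)] := by simp
    rw [hrev]
    unfold rleStep rleR
    rw [List.getLast?_concat, List.dropLast_concat]
    by_cases hdc : d = c
    · simp [hdc]
    · simp [hdc]

theorem foldl_rleStep_rev (l : List Char) (rl : List (Char × Nat)) :
    l.foldl rleStep rl.reverse = (l.foldl rleR rl).reverse := by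
  induction l generalizing rl with
  | nil => rfl
  | cons c l ih => simp only [List.foldl_cons, rleStep_rev, ih]

-- correctness of the run-length encoding fold
theorem rle_fold (cs : List Char) (rl : List (Char × Nat))
    (h1 : List.IsChain (fun p q => p.1 ≠ q.1) rl) (h2 : ∀ p ∈ rl, 1 ≤ p.2) :
    rexpand (cs.foldl rleR rl) = cs.reverse ++ rexpand rl ∧
    List.IsChain (fun p q => p.1 ≠ q.1) (cs.foldl rleR rl) ∧
    ∀ p ∈ cs.foldl rleR rl, 1 ≤ p.2 := by
  induction cs generalizing rl with
  | nil => exact ⟨by simp, h1, h2⟩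
  | cons c cs ih =>
    have hstep : rexpand (rleR rl c) = c :: rexpand rl ∧
        List.IsChain (fun p q => p.1 ≠ q.1) (rleR rl c) ∧
        ∀ p ∈ rleR rl c, 1 ≤ p.2 := by
      cases rl with
      | nil => exact ⟨by simp [rleR, rexpand], by simp [rleR], by simp [rleR]⟩
      | cons p rest =>
        obtain ⟨d, k⟩ := p
        by_cases hdc : d = c
        · subst hdc
          refine ⟨?_, ?_, ?_⟩
          · simp [rleR, rexpand, List.replicate_succ]
          · simp only [rleR, if_true]
            cases rest with
            | nil => simp
            | cons q rest' =>
              exact List.isChain_cons_cons.mpr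
                ⟨(List.isChain_cons_cons.mp h1).1, (List.isChain_cons_cons.mp h1).2⟩
          · intro q hq
            simp only [rleR, if_true] at hq
            rcases List.mem_cons.mp hq with h | h
            · subst h; omega
            · exact h2 q (List.mem_cons_of_mem _ h)
        · refine ⟨?_, ?_, ?_⟩
          · simp [rleR, hdc, rexpand]
          · simp only [rleR, if_neg hdc]
            exact List.isChain_cons_cons.mpr ⟨fun h => hdc h.symm, h1⟩
          · intro q hq
            simp only [rleR, if_neg hdc] at hq
            rcases List.mem_cons.mp hq with h | h
            · subst h; omega
            · exact h2 q h
    obtain ⟨he, hc, hcnt⟩ := hstep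
    obtain ⟨ihe, ihc, ihcnt⟩ := ih (rleR rl c) hc hcnt
    refine ⟨?_, ihc, ihcnt⟩
    rw [List.foldl_cons, ihe, he]
    simp

-- once the last kept run is a double of c, further c's are all dropped
theorem stay_double (m : Nat) (c : Char) (rs : List (Char × Nat)) :
    (List.replicate m c).foldl rstep ((c, 2) :: rs) = (c, 2) :: rs := by
  induction m with
  | zero => rfl
  | succ m ih => simpa [List.replicate_succ, rstep] using ih

-- a single of c after a kept double blocks all further c's
theorem stay_blocked (m : Nat) (c e : Char) (rs : List (Char × Nat)) :
    (List.replicate m c).foldl rstep ((c, 1) :: (e, 2) :: rs) = (c, 1) :: (e, 2) :: rs := by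
  induction m with
  | zero => rfl
  | succ m ih => simpa [List.replicate_succ, rstep] using ih

-- the greedy over one whole input run, in closed form
theorem run_fold (c : Char) (k : Nat) (hk : 1 ≤ k) (rs : List (Char × Nat))
    (hne : ∀ p ∈ rs.head?, p.1 ≠ c) :
    (List.replicate k c).foldl rstep rs
      = (c, if 2 ≤ k ∧ pdOf rs = false then 2 else 1) :: rs := by
  obtain ⟨k', rfl⟩ : ∃ k', k = k' + 1 := ⟨k - 1, by omega⟩
  have hstep1 : rstep rs c = (c, 1) :: rs := by
    cases rs with
    | nil => rfl
    | cons p rest =>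
      obtain ⟨d, kk⟩ := p
      have hdc : ¬ d = c := hne (d, kk) (by simp)
      simp [rstep, hdc]
  rw [List.replicate_succ, List.foldl_cons, hstep1]
  cases rs with
  | nil =>
    cases k' with
    | zero => simp [pdOf]
    | succ m =>
      have h2 : rstep [(c, 1)] c = [(c, 2)] := by simp [rstep]
      rw [List.replicate_succ, List.foldl_cons, h2, stay_double]
      simp [pdOf]
  | cons q rs' =>
    obtain ⟨e, k2⟩ := q
    by_cases hk2 : k2 = 2
    · subst hk2
      rw [stay_blocked]
      simp [pdOf]
    · cases k' with
      | zero => simp [pdOf, hk2]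
      | succ m =>
        have h2 : rstep ((c, 1) :: (e, k2) :: rs') c = (c, 2) :: (e, k2) :: rs' := by
          simp [rstep, hk2]
        rw [List.replicate_succ, List.foldl_cons, h2, stay_double]
        simp [pdOf, hk2]

-- the greedy over the whole expanded run list = B's stage 2 (reversed)
theorem runs_fold (R : List (Char × Nat)) (rs : List (Char × Nat))
    (hch : List.IsChain (fun p q => p.1 ≠ q.1) R) (hcnt : ∀ p ∈ R, 1 ≤ p.2)
    (hne : ∀ p ∈ R.head?, ∀ q ∈ rs.head?, q.1 ≠ p.1) :
    (rexpand R).foldl rstep rs = (procRuns (pdOf rs) R).reverse ++ rs := by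
  induction R generalizing rs with
  | nil => simp [rexpand, procRuns]
  | cons p R' ih =>
    obtain ⟨c, k⟩ := p
    have hk : 1 ≤ k := hcnt (c, k) (by simp)
    have hne' : ∀ q ∈ rs.head?, q.1 ≠ c := fun q hq => hne (c, k) (by simp) q hq
    have hexp : rexpand ((c, k) :: R') = List.replicate k c ++ rexpand R' := by
      simp [rexpand]
    rw [hexp, List.foldl_append, run_fold c k hk rs hne']
    set t := if 2 ≤ k ∧ pdOf rs = false then 2 else 1 with ht
    have hch' : List.IsChain (fun p q => p.1 ≠ q.1) R' := by
      cases R' with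
      | nil => simp
      | cons q R'' => exact (List.isChain_cons_cons.mp hch).2
    have hcnt' : ∀ p ∈ R', 1 ≤ p.2 := fun p hp => hcnt p (List.mem_cons_of_mem _ hp)
    have hne'' : ∀ p ∈ R'.head?, ∀ q ∈ ((c, t) :: rs).head?, q.1 ≠ p.1 := by
      intro p hp q hq
      simp only [List.head?_cons, Option.mem_def, Option.some.injEq] at hq
      subst hq
      cases R' with
      | nil => simp at hp
      | cons r R'' =>
        simp only [List.head?_cons, Option.mem_def, Option.some.injEq] at hp
        subst hp
        exact (List.isChain_cons_cons.mp hch).1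
    have hpd : pdOf ((c, t) :: rs) = (t == 2) := rfl
    rw [ih ((c, t) :: rs) hch' hcnt' hne'', hpd]
    simp [procRuns, ← ht, List.append_assoc]

-- PySem.Chars.join with empty separator is flatten
theorem join_nil_flatten (L : List (List Char)) : PySem.Chars.join [] L = L.flatten := by
  have h : ∀ (M : List (List Char)), (List.intersperse ([] : List Char) M).flatten = M.flatten := by
    intro M
    induction M with
    | nil => rfl
    | cons a M ih =>
      cases M with
      | nil => rfl
      | cons b N => simpa [List.intersperse] using ih
  simpa [PySem.Chars.join, List.intercalate] using h L

-- B's stage-2 fold, accumulator generalised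
theorem out_fold (R : List (Char × Nat)) (acc : List String) (pd : Bool) :
    (R.foldl outStep (acc, pd)).1
      = acc ++ (procRuns pd R).map (fun p => String.ofList (List.replicate p.2 p.1)) := by
  induction R generalizing acc pd with
  | nil => simp [procRuns]
  | cons p R' ih =>
    obtain ⟨c, k⟩ := p
    rw [List.foldl_cons]
    show (R'.foldl outStep
        (acc ++ [String.ofList (List.replicate (if 2 ≤ k ∧ pd = false then 2 else 1) c)],
         (if 2 ≤ k ∧ pd = false then 2 else 1) == 2)).1 = _
    rw [ih]
    simp [procRuns]

-- joining the mapped pieces is expanding the runs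
theorem join_pieces (L : List (Char × Nat)) :
    PySem.Str.join "" (L.map (fun p => String.ofList (List.replicate p.2 p.1)))
      = String.ofList (rexpand L) := by
  apply String.toList_injective
  rw [PySem.Str.toList_join]
  simp only [String.toList_ofList, List.map_map]
  rw [show ("" : String).toList = [] from rfl, join_nil_flatten]
  simp [rexpand, List.flatMap_def, Function.comp_def]

-- ===== VERDICT (by name: the statement is the Claim_ definition above) =====
theorem solve_spec : Claim_equal_solve := by
  unfold Claim_equal_solve
  intro s _
  unfold Spec_solve
  rw [solveA_char]
  unfold solve_alt
  dsimp only
  set cs := s.toList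
  have hmirr : cs.foldl rleStep [] = (cs.foldl rleR []).reverse := by
    simpa using foldl_rleStep_rev cs []
  obtain ⟨hexp, hch, hcnt⟩ := rle_fold cs [] (by simp) (by simp)
  set Rrev := cs.foldl rleR [] with hRrev
  set R := Rrev.reverse with hR
  have hexpR : rexpand R = cs := by
    rw [hR, rexpand_reverse, hexp]
    simp [rexpand]
  have hchR : List.IsChain (fun p q => p.1 ≠ q.1) R := by
    rw [hR]
    exact List.isChain_reverse.mpr (hch.imp fun a b h => Ne.symm h)
  have hcntR : ∀ p ∈ R, 1 ≤ p.2 := by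
    intro p hp
    exact hcnt p (by simpa [hR] using hp)
  have hgreedy : cs.foldl rstep [] = (procRuns false R).reverse := by
    have := runs_fold R [] hchR hcntR (by simp)
    rw [hexpR] at this
    simpa [pdOf] using this
  rw [hgreedy, rexpand_reverse, List.reverse_reverse, hmirr,
    out_fold R [] false, List.nil_append, join_pieces]
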